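-- pv_equiv track=rewrite | github.com/Ajay199903/MajorProject | firefly.py | indexNodes
-- ===== SOURCE A (Python) =====
-- def indexNodes(edgeList):
--
--     unique_nodes = get_unique_nodes(edgeList)
--     node_map = dict()
--
--     for i in range(len(unique_nodes)):
--         node_map[unique_nodes[i]] = i
--
--     for i in range(len(edgeList)):
--         edgeList[i][0] = node_map[edgeList[i][0]]
--         edgeList[i][1] = node_map[edgeList[i][1]]
--
--     return edgeList
--
-- def get_unique_nodes(edgeList):
--     unique_nodes = set()
--
--     for edge in edgeList:
--         unique_nodes.add(edge[0])
--         unique_nodes.add(edge[1])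
--
--     unique_nodes = sorted(list(unique_nodes))
--     return unique_nodes
-- ===== SOURCE B (Python) =====
-- def _bisect_left(a, x):
--     lo, hi = 0, len(a)
--     while lo < hi:
--         mid = (lo + hi) // 2
--         if a[mid] < x:
--             lo = mid + 1
--         else:
--             hi = mid
--     return lo
--
--
-- def indexNodes(edgeList):
--     nodes = set()
--     for edge in edgeList:
--         nodes.add(edge[0])
--         nodes.add(edge[1])
--     nodes = sorted(nodes)
--     edgeList[:] = [[_bisect_left(nodes, e[0]), _bisect_left(nodes, e[1])] + e[2:]
--                    for e in edgeList]
--     return edgeList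
-- ===== Notes on version B (the rewrite author's own statement) =====
-- stated objective: alternative
-- what changed: B drops A's node->index dict entirely: it keeps only the sorted unique-node array and maps each endpoint with a hand-written binary search (bisect_left), rebuilding the list in one comprehension instead of A's indexed in-place loop.
import Mathlib
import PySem

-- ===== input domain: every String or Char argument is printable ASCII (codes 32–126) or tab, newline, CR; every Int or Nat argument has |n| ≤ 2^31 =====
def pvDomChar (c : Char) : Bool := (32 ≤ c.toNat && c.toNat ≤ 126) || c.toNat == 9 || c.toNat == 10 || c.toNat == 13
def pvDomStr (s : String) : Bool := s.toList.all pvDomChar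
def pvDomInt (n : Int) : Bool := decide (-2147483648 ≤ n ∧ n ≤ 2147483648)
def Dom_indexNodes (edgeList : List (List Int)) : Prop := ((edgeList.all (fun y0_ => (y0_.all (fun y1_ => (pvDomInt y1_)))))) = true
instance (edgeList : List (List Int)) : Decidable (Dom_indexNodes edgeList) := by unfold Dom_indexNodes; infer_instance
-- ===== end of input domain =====

-- B replaces A's node->index dict with binary search over the sorted unique-node list and a single
-- rebuilding comprehension (alternative decomposition, same cost). Both Pythons mutate edgeList in
-- place; the equivalence proved here is about the RETURN value only.

-- ===== PORT A =====
-- helper get_unique_nodes: set of both endpoints of every edge, then sorted.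
-- edge[0] / edge[1] are ported as pyGetD with default 0; Python raises IndexError on edges
-- shorter than 2, and Pre_indexNodes excludes exactly those inputs.
def getUniqueNodes (edgeList : List (List Int)) : List Int :=
  PySem.List.sorted
    (edgeList.foldl
      (fun s e => PySem.Set.add (PySem.Set.add s (PySem.List.pyGetD e 0 0)) (PySem.List.pyGetD e 1 0))
      PySem.Set.empty)
    (fun x => x)

-- A: build node_map by an index loop over unique_nodes, then rewrite positions 0 and 1 of every
-- edge through the dict (the in-place writes become a map that keeps the edge's tail unchanged).
-- node_map[x] (KeyError if absent) is ported as getD _ 0; every looked-up key was inserted.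
def indexNodes (edgeList : List (List Int)) : List (List Int) :=
  let unique_nodes := getUniqueNodes edgeList
  let node_map := (PySem.List.pyRange 0 (PySem.List.len unique_nodes)).foldl
    (fun d i => d.insert (PySem.List.pyGetD unique_nodes i 0) i)
    (PySem.Dict.empty : PySem.Dict Int Int)
  edgeList.map (fun e =>
    node_map.getD (PySem.List.pyGetD e 0 0) 0 ::
      node_map.getD (PySem.List.pyGetD e 1 0) 0 :: e.drop 2)

-- ===== PORT B =====
-- hand-written _bisect_left of Source B: while lo < hi halving loop (a[mid] via pyGetD, default 0)
def bisectLeftLoop (a : List Int) (x : Int) (lo hi : Int) : Int :=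
  if h : lo < hi then
    let mid := PySem.Int.floordiv (lo + hi) 2
    if PySem.List.pyGetD a mid 0 < x then bisectLeftLoop a x (mid + 1) hi
    else bisectLeftLoop a x lo mid
  else lo
termination_by (hi - lo).toNat
decreasing_by
  · have hb := (PySem.Int.floordiv_two_mid_bounds (le_of_lt h)).1
    omega
  · have hb := (PySem.Int.floordiv_two_mid_bounds (le_of_lt h)).1
    have h2 : PySem.Int.floordiv (lo + hi) 2 < hi :=
      (PySem.Int.floordiv_lt_iff_lt_mul (by norm_num)).mpr (by omega)
    omega

def bisectLeftB (a : List Int) (x : Int) : Int :=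
  bisectLeftLoop a x 0 (PySem.List.len a)

-- B: same sorted unique-node list, then one comprehension [[bl(e0), bl(e1)] + e[2:] for e in edgeList]
def indexNodes_alt (edgeList : List (List Int)) : List (List Int) :=
  let nodes := getUniqueNodes edgeList
  edgeList.map (fun e =>
    [bisectLeftB nodes (PySem.List.pyGetD e 0 0),
     bisectLeftB nodes (PySem.List.pyGetD e 1 0)] ++ PySem.List.slice e (some 2))

-- ===== PRECONDITION & SPEC =====
-- Pre_ excludes exactly the inputs where Python A raises IndexError: an edge with fewer than
-- two entries (B raises there too).
def Pre_indexNodes (edgeList : List (List Int)) : Prop := ∀ e ∈ edgeList, 2 ≤ e.length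
instance (edgeList : List (List Int)) : Decidable (Pre_indexNodes edgeList) := by
  unfold Pre_indexNodes; infer_instance

def pvWitness_indexNodes : List (List Int) := [[1, 2], [3, 1], [2, 3]]

def Spec_indexNodes (edgeList : List (List Int)) (out : List (List Int)) : Prop := out = indexNodes_alt edgeList
instance (edgeList : List (List Int)) (out : List (List Int)) : Decidable (Spec_indexNodes edgeList out) := by unfold Spec_indexNodes; infer_instance

-- ===== CLAIM (what is proved, stated in full; the proofs are below) =====
def Claim_equal_indexNodes : Prop := ∀ (edgeList : List (List Int)), Dom_indexNodes edgeList → Pre_indexNodes edgeList → Spec_indexNodes edgeList (indexNodes edgeList)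

-- ===== LEMMAS AND PROOFS =====

-- the double-add foldl building the endpoint set IS Set.ofList of the flattened endpoint list
lemma pvFoldlAdd2 (l : List (List Int)) (s : PySem.Set Int) :
    l.foldl
      (fun s e => PySem.Set.add (PySem.Set.add s (PySem.List.pyGetD e 0 0)) (PySem.List.pyGetD e 1 0)) s
    = (l.flatMap (fun e => [PySem.List.pyGetD e 0 0, PySem.List.pyGetD e 1 0])).foldl PySem.Set.add s := by
  induction l generalizing s with
  | nil => rfl
  | cons e t ih => simpa using ih (PySem.Set.add (PySem.Set.add s (PySem.List.pyGetD e 0 0)) (PySem.List.pyGetD e 1 0))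

lemma pvUniqEq (el : List (List Int)) :
    getUniqueNodes el
      = PySem.List.sorted
          (PySem.Set.ofList (el.flatMap (fun e => [PySem.List.pyGetD e 0 0, PySem.List.pyGetD e 1 0])))
          (fun x => x) := by
  unfold getUniqueNodes PySem.Set.ofList
  rw [pvFoldlAdd2]

lemma pvUniqSorted (el : List (List Int)) :
    (getUniqueNodes el).Pairwise (· < ·) := by
  rw [pvUniqEq]
  exact PySem.List.sorted_ofList_pairwise_lt _

lemma pvUniqMem (el : List (List Int)) (e : List Int) (he : e ∈ el) :
    PySem.List.pyGetD e 0 0 ∈ getUniqueNodes el ∧ PySem.List.pyGetD e 1 0 ∈ getUniqueNodes el := by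
  rw [pvUniqEq]
  constructor <;>
    · rw [PySem.List.mem_sorted, PySem.Set.mem_ofList, List.mem_flatMap]
      exact ⟨e, he, by simp⟩

-- dict side: the foldl over enumerate leaves keys not in t untouched …
lemma pvFoldGetNot (t : List Int) (v : Int) (hv : v ∉ t) :
    ∀ (s : Int) (d : PySem.Dict Int Int),
      ((PySem.List.enumerate t s).foldl (fun d p => d.insert p.2 p.1) d).get? v = d.get? v := by
  induction t with
  | nil => intro s d; simp [PySem.List.enumerate]
  | cons x t ih =>
    intro s d
    rw [PySem.List.enumerate_cons]
    simp only [List.foldl_cons]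
    rw [ih (fun h => hv (List.mem_cons_of_mem _ h))]
    exact PySem.Dict.get?_insert_of_ne d s (fun h => hv (h ▸ List.mem_cons_self))

-- … and maps each member of a nodup t to its index (offset by the start s)
lemma pvFoldGet (t : List Int) (v : Int) :
    ∀ (s : Int) (d : PySem.Dict Int Int), t.Nodup → v ∈ t →
      ((PySem.List.enumerate t s).foldl (fun d p => d.insert p.2 p.1) d).get? v
        = some (s + (t.idxOf v : Int)) := by
  induction t with
  | nil => intro s d _ hv; cases hv
  | cons x t ih =>
    intro s d hnd hv
    rw [PySem.List.enumerate_cons]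
    simp only [List.foldl_cons]
    by_cases hx : v = x
    · subst hx
      rw [pvFoldGetNot t v (List.nodup_cons.mp hnd).1]
      rw [PySem.Dict.get?_insert_self]
      simp [List.idxOf_cons_self]
    · rw [ih (s + 1) _ (List.Nodup.of_cons hnd) (by
        rcases List.mem_cons.mp hv with h | h
        · exact absurd h hx
        · exact h)]
      rw [List.idxOf_cons_ne _ (fun h => hx h.symm)]
      push_cast
      ring_nf

lemma pvDictIdx (u : List Int) (hnd : u.Nodup) (v : Int) (hv : v ∈ u) :
    ((PySem.List.pyRange 0 (PySem.List.len u)).foldl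
        (fun d i => d.insert (PySem.List.pyGetD u i 0) i)
        (PySem.Dict.empty : PySem.Dict Int Int)).getD v 0
      = (u.idxOf v : Int) := by
  have he : (PySem.List.pyRange 0 (PySem.List.len u)).foldl
      (fun d i => d.insert (PySem.List.pyGetD u i 0) i)
      (PySem.Dict.empty : PySem.Dict Int Int)
      = (PySem.List.enumerate u).foldl (fun d p => d.insert p.2 p.1) PySem.Dict.empty := by
    rw [PySem.List.enumerate_eq_map_pyRange u 0, List.foldl_map]
  rw [he, PySem.Dict.getD_eq_get?_getD, pvFoldGet u v 0 _ hnd hv]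
  simp

-- binary-search side: the loop invariant of _bisect_left
lemma pvBlRet (u : List Int) (v : Int) (hs : u.Pairwise (· ≤ ·)) :
    ∀ (m : Nat) (lo hi : Int), (hi - lo).toNat ≤ m → 0 ≤ lo → lo ≤ hi → hi ≤ (u.length : Int) →
      (∀ (j : Nat) (hj : j < u.length), (j : Int) < lo → u[j] < v) →
      (∀ (j : Nat) (hj : j < u.length), hi ≤ (j : Int) → v ≤ u[j]) →
      lo ≤ bisectLeftLoop u v lo hi ∧ bisectLeftLoop u v lo hi ≤ hi ∧
      (∀ (j : Nat) (hj : j < u.length), (j : Int) < bisectLeftLoop u v lo hi → u[j] < v) ∧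
      (∀ (j : Nat) (hj : j < u.length), bisectLeftLoop u v lo hi ≤ (j : Int) → v ≤ u[j]) := by
  intro m
  induction m with
  | zero =>
    intro lo hi hm h0 hlh hlen hL hR
    rw [bisectLeftLoop, dif_neg (by omega : ¬ lo < hi)]
    exact ⟨le_refl lo, hlh, hL, fun j hj hjlo => hR j hj (by omega)⟩
  | succ m ih =>
    intro lo hi hm h0 hlh hlen hL hR
    rw [bisectLeftLoop]
    by_cases h : lo < hi
    · rw [dif_pos h]
      have hb := PySem.Int.floordiv_two_mid_bounds (le_of_lt h)
      have hml : PySem.Int.floordiv (lo + hi) 2 < hi :=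
        (PySem.Int.floordiv_lt_iff_lt_mul (by norm_num)).mpr (by omega)
      set mid := PySem.Int.floordiv (lo + hi) 2 with hmid
      have h0m : 0 ≤ mid := le_trans h0 hb.1
      have hmlen : mid.toNat < u.length := by omega
      have hget : PySem.List.pyGetD u mid 0 = u[mid.toNat] := by
        rw [PySem.List.pyGetD_of_nonneg u 0 h0m]
        exact List.getD_eq_getElem u 0 hmlen
      by_cases hc : PySem.List.pyGetD u mid 0 < v
      · rw [if_pos hc]
        rw [hget] at hc
        refine (ih (mid + 1) hi (by omega) (by omega) (by omega) hlen ?_ hR).imp (by omega) id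
        intro j hj hjm
        rcases lt_trichotomy j mid.toNat with hlt | heq | hgt
        · exact lt_of_le_of_lt (List.pairwise_iff_getElem.mp hs j mid.toNat hj hmlen hlt) hc
        · subst heq; exact hc
        · omega
      · rw [if_neg hc]
        rw [hget] at hc
        have hc' : v ≤ u[mid.toNat] := not_lt.mp hc
        refine (ih lo mid (by omega) h0 (by omega) (by omega) hL ?_).imp id (fun hr => hr.imp (by omega) id)
        intro j hj hjm
        rcases lt_trichotomy mid.toNat j with hlt | heq | hgt
        · exact le_trans hc' (List.pairwise_iff_getElem.mp hs mid.toNat j hmlen hj hlt)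
        · subst heq; exact hc'
        · omega
    · rw [dif_neg h]
      exact ⟨le_refl lo, hlh, hL, fun j hj hjlo => hR j hj (by omega)⟩

lemma pvBlIdx (u : List Int) (hlt : u.Pairwise (· < ·)) (v : Int) (hv : v ∈ u) :
    bisectLeftB u v = (u.idxOf v : Int) := by
  have hs : u.Pairwise (· ≤ ·) := hlt.imp le_of_lt
  have hk : u.idxOf v < u.length := List.idxOf_lt_length_of_mem hv
  have hkv : u[u.idxOf v] = v := List.getElem_idxOf hk
  have hlen : PySem.List.len u = (u.length : Int) := PySem.List.len_eq u
  obtain ⟨h1, h2, h3, h4⟩ :=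
    pvBlRet u v hs ((u.length : Int) - 0).toNat 0 (u.length : Int) (le_refl _) (le_refl 0)
      (by omega) (le_refl _)
      (fun j hj hjlo => absurd hjlo (by omega))
      (fun j hj hjlo => absurd hjlo (by omega))
  unfold bisectLeftB
  rw [hlen]
  set r := bisectLeftLoop u v 0 (u.length : Int) with hr
  rcases lt_trichotomy r ((u.idxOf v : Nat) : Int) with hc | hc | hc
  · exfalso
    have hrn : r.toNat < u.idxOf v := by omega
    have hv1 : v ≤ u[r.toNat] := h4 r.toNat (by omega) (by omega)
    have hv2 : u[r.toNat] < u[u.idxOf v] :=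
      List.pairwise_iff_getElem.mp hlt r.toNat (u.idxOf v) (by omega) hk hrn
    rw [hkv] at hv2
    exact absurd (lt_of_le_of_lt hv1 hv2) (lt_irrefl v)
  · exact hc
  · exfalso
    have := h3 (u.idxOf v) hk (by omega)
    rw [hkv] at this
    exact absurd this (lt_irrefl v)

-- ===== VERDICT (by name: the statement is the Claim_ definition above) =====
theorem indexNodes_spec : Claim_equal_indexNodes := by
  intro el _hdom _hpre
  unfold Spec_indexNodes
  simp only [indexNodes, indexNodes_alt]
  apply List.map_congr_left
  intro e he
  have hlt := pvUniqSorted el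
  have hnd : (getUniqueNodes el).Nodup := hlt.imp ne_of_lt
  obtain ⟨hm0, hm1⟩ := pvUniqMem el e he
  rw [PySem.List.slice_from e (by norm_num : (0:Int) ≤ 2)]
  rw [pvDictIdx _ hnd _ hm0, pvDictIdx _ hnd _ hm1, pvBlIdx _ hlt _ hm0, pvBlIdx _ hlt _ hm1]
  rfl
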